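-- pv_equiv track=rewrite | github.com/gladshire/bioinformatics | scripts/translate_sym.py | strans
-- ===== SOURCE A (Python) =====
-- def strans(mrna_strand):
--     codon_protein_sym = {'UUU': 'F', 'UUC': 'F', 'UUA': 'L', 'UUG': 'L',
--                          'UCU': 'S', 'UCC': 'S', 'UCA': 'S', 'UCG': 'S',
--                          'UAU': 'Y', 'UAC': 'Y', 'UAA': 'Stop', 'UAG': 'Stop',
--                          'UGU': 'C', 'UGC': 'C', 'UGA': 'Stop', 'UGG': 'W',
--                          'CUU': 'L', 'CUC': 'L', 'CUA': 'L', 'CUG': 'L',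
--                          'CCU': 'P', 'CCC': 'P', 'CCA': 'P', 'CCG': 'P',
--                          'CAU': 'H', 'CAC': 'H', 'CAA': 'Q', 'CAG': 'Q',
--                          'CGU': 'R', 'CGC': 'R', 'CGA': 'R', 'CGG': 'R',
--                          'AUU': 'I', 'AUC': 'I', 'AUA': 'I', 'AUG': 'M',
--                          'ACU': 'T', 'ACC': 'T', 'ACA': 'T', 'ACG': 'T',
--                          'AAU': 'N', 'AAC': 'N', 'AAA': 'K', 'AAG': 'K',
--                          'AGU': 'S', 'AGC': 'S', 'AGA': 'R', 'AGG': 'R',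
--                          'GUU': 'V', 'GUC': 'V', 'GUA': 'V', 'GUG': 'V',
--                          'GCU': 'A', 'GCC': 'A', 'GCA': 'A', 'GCG': 'A',
--                          'GAU': 'D', 'GAC': 'D', 'GAA': 'E', 'GAG': 'E',
--                          'GGU': 'G', 'GGC': 'G', 'GGA': 'G', 'GGG': 'G',
--                          '\n': ''}
--
--     rna_codons = []
--     peps       = []
--     curr_ind   = 0
--     start_ind  = 0
--
--     while curr_ind < len(mrna_strand):
--         curr_ind = start_ind + 3
--         rna_codons.append(mrna_strand[start_ind:curr_ind])
--         start_ind = curr_ind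
--
--     protein_seq = ''.join([codon_protein_sym[codon] for codon in rna_codons])
--
--     for prot_str in protein_seq.split('Stop'):
--         if len(prot_str) != 0:
--             peps.append(prot_str)
--
--     return peps
-- ===== SOURCE B (Python) =====
-- def strans(mrna_strand):
--     base_index = {'U': 0, 'C': 1, 'A': 2, 'G': 3}
--     # standard-table amino acids indexed by 16*b1 + 4*b2 + b3 (U,C,A,G order); '*' marks a stop codon
--     aa = 'FFLLSSSSYY**CC*WLLLLPPPPHHQQRRRRIIIMTTTTNNKKSSRRVVVVAAAADDEEGGGG'
--     peps = []
--     cur = ''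
--     for i in range(0, len(mrna_strand), 3):
--         codon = mrna_strand[i:i + 3]
--         if codon == '\n':
--             continue
--         sym = aa[base_index[codon[0]] * 16 + base_index[codon[1]] * 4 + base_index[codon[2]]]
--         if sym == '*':
--             if cur:
--                 peps.append(cur)
--             cur = ''
--         else:
--             cur += sym
--     if cur:
--         peps.append(cur)
--     return peps
-- ===== Notes on version B (the rewrite author's own statement) =====
-- stated objective: alternative
-- what changed: Replaces A's three phases (chunk the strand into a codon list, dict-join all symbols into one protein string, split that string on 'Stop' and filter) and A's 65-entry codon dict by a single streaming index loop that decodes each codon arithmetically (U/C/A/G base values indexing a 64-character amino-acid string, '*' marking stops) and flushes the current peptide at each stop codon, never materialising the codon list or the protein string.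
import Mathlib
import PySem

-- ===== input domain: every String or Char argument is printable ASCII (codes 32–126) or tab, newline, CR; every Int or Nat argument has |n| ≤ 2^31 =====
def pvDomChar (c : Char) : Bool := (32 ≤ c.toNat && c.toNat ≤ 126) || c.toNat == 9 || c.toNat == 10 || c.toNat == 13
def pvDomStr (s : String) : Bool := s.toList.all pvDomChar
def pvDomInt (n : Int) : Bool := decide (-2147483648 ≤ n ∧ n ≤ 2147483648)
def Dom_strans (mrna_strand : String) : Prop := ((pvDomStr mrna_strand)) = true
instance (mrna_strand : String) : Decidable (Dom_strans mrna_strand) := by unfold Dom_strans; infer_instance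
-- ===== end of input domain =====

-- B drops A's chunk-list + join-into-protein-string + split-on-'Stop' pipeline for one streaming
-- index loop that decodes each codon arithmetically (base values into a 64-char amino-acid string)
-- and flushes the current peptide at each stop codon (alternative decomposition, same O(n) cost).


-- ===== PORT A =====
-- the dict literal of Source A: 65 distinct keys, so its items list is exactly the literal pair list
def stransTable : PySem.Dict (List Char) (List Char) := PySem.Dict.mk
  [ (['U','U','U'], ['F']), (['U','U','C'], ['F']), (['U','U','A'], ['L']), (['U','U','G'], ['L']),
    (['U','C','U'], ['S']), (['U','C','C'], ['S']), (['U','C','A'], ['S']), (['U','C','G'], ['S']),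
    (['U','A','U'], ['Y']), (['U','A','C'], ['Y']), (['U','A','A'], ['S','t','o','p']), (['U','A','G'], ['S','t','o','p']),
    (['U','G','U'], ['C']), (['U','G','C'], ['C']), (['U','G','A'], ['S','t','o','p']), (['U','G','G'], ['W']),
    (['C','U','U'], ['L']), (['C','U','C'], ['L']), (['C','U','A'], ['L']), (['C','U','G'], ['L']),
    (['C','C','U'], ['P']), (['C','C','C'], ['P']), (['C','C','A'], ['P']), (['C','C','G'], ['P']),
    (['C','A','U'], ['H']), (['C','A','C'], ['H']), (['C','A','A'], ['Q']), (['C','A','G'], ['Q']),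
    (['C','G','U'], ['R']), (['C','G','C'], ['R']), (['C','G','A'], ['R']), (['C','G','G'], ['R']),
    (['A','U','U'], ['I']), (['A','U','C'], ['I']), (['A','U','A'], ['I']), (['A','U','G'], ['M']),
    (['A','C','U'], ['T']), (['A','C','C'], ['T']), (['A','C','A'], ['T']), (['A','C','G'], ['T']),
    (['A','A','U'], ['N']), (['A','A','C'], ['N']), (['A','A','A'], ['K']), (['A','A','G'], ['K']),
    (['A','G','U'], ['S']), (['A','G','C'], ['S']), (['A','G','A'], ['R']), (['A','G','G'], ['R']),
    (['G','U','U'], ['V']), (['G','U','C'], ['V']), (['G','U','A'], ['V']), (['G','U','G'], ['V']),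
    (['G','C','U'], ['A']), (['G','C','C'], ['A']), (['G','C','A'], ['A']), (['G','C','G'], ['A']),
    (['G','A','U'], ['D']), (['G','A','C'], ['D']), (['G','A','A'], ['E']), (['G','A','G'], ['E']),
    (['G','G','U'], ['G']), (['G','G','C'], ['G']), (['G','G','A'], ['G']), (['G','G','G'], ['G']),
    (['\n'], []) ]

-- codon_protein_sym[c]; KeyError (get? = none) is excluded by Pre_strans, the getD default is never used there
def stransSym (c : List Char) : List Char := (stransTable.get? c).getD []

-- the while loop collecting mrna_strand[start_ind:start_ind+3] slices (loop test 'curr_ind < len' equals 'start_ind < len' at the head of each iteration)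
def stransLoop (cs : List Char) (start_ind : Nat) : List (List Char) :=
  if _h : start_ind < cs.length then
    PySem.List.slice cs (some (start_ind : Int)) (some ((start_ind : Int) + 3)) :: stransLoop cs (start_ind + 3)
  else []
  termination_by cs.length - start_ind

def strans (mrna_strand : String) : List String :=
  let rna_codons := stransLoop mrna_strand.toList 0
  let protein_seq := PySem.Chars.join [] (rna_codons.map stransSym)
  let peps := (PySem.Chars.splitOn protein_seq ['S','t','o','p']).foldl
    (fun peps prot_str => if prot_str.length ≠ 0 then peps ++ [prot_str] else peps) []
  peps.map String.ofList

-- ===== PORT B =====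
-- Source B's base_index dict {'U':0,'C':1,'A':2,'G':3}
def stransBase : PySem.Dict Char Int := PySem.Dict.mk [('U', 0), ('C', 1), ('A', 2), ('G', 3)]

-- Source B's 64-char amino-acid string aa, indexed by 16*b1 + 4*b2 + b3 ('*' = stop)
def stransAA : List Char :=
  ['F','F','L','L','S','S','S','S','Y','Y','*','*','C','C','*','W',
   'L','L','L','L','P','P','P','P','H','H','Q','Q','R','R','R','R',
   'I','I','I','M','T','T','T','T','N','N','K','K','S','S','R','R',
   'V','V','V','V','A','A','A','A','D','D','E','E','G','G','G','G']

-- the loop-body lookup aa[base[codon[0]]*16 + base[codon[1]]*4 + base[codon[2]]]; every getD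
-- default stands for an exception (KeyError / IndexError) Python would raise, excluded by Pre_strans
def stransAltSymChar (codon : List Char) : Char :=
  let b := fun (j : Int) => (stransBase.get? ((PySem.List.pyGet? codon j).getD ' ')).getD 0
  (PySem.List.pyGet? stransAA (b 0 * 16 + b 1 * 4 + b 2)).getD 'X'

-- for i in range(0, len, 3): codon = s[i:i+3]; skip '\n'; flush on '*' else extend cur; final flush
def stransAltGo (cs : List Char) (i : Nat) (cur : List Char) (peps : List (List Char)) : List (List Char) :=
  if _h : i < cs.length then
    let codon := PySem.List.slice cs (some (i : Int)) (some ((i : Int) + 3))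
    if codon = ['\n'] then stransAltGo cs (i + 3) cur peps
    else
      let sym := stransAltSymChar codon
      if sym = '*' then stransAltGo cs (i + 3) [] (if cur ≠ [] then peps ++ [cur] else peps)
      else stransAltGo cs (i + 3) (cur ++ [sym]) peps
  else if cur ≠ [] then peps ++ [cur] else peps
  termination_by cs.length - i

def strans_alt (mrna_strand : String) : List String :=
  (stransAltGo mrna_strand.toList 0 [] []).map String.ofList

-- ===== PRECONDITION & SPEC =====
-- Pre_strans excludes exactly the strands with a codon (a length-3 slice at a multiple of 3,
-- or the shorter final slice) that is not a key of the table: A raises KeyError there.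
def Pre_strans (mrna_strand : String) : Prop :=
  ∀ i ∈ List.range mrna_strand.toList.length, i % 3 = 0 →
    stransTable.contains ((mrna_strand.toList.drop i).take 3) = true
instance (mrna_strand : String) : Decidable (Pre_strans mrna_strand) := by unfold Pre_strans; infer_instance
def pvWitness_strans : String := "AUGGCCUAAUUU"

def Spec_strans (mrna_strand : String) (out : List String) : Prop := out = strans_alt mrna_strand
instance (mrna_strand : String) (out : List String) : Decidable (Spec_strans mrna_strand out) := by unfold Spec_strans; infer_instance

-- ===== CLAIM (what is proved, stated in full; the proofs are below) =====
def Claim_equal_strans : Prop := ∀ (mrna_strand : String), Dom_strans mrna_strand → Pre_strans mrna_strand → Spec_strans mrna_strand (strans mrna_strand)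

-- ===== LEMMAS AND PROOFS =====

-- the codon list both programs traverse: take-3 / drop-3 blocks
def stransChunks : List Char → List (List Char)
  | [] => []
  | c :: r => ((c :: r).take 3) :: stransChunks ((c :: r).drop 3)
  termination_by cs => cs.length
  decreasing_by simp [List.length_drop]

-- what B's loop body contributes for one codon, as a symbol of A's kind
def stransAltSym (c : List Char) : List Char :=
  if c = ['\n'] then []
  else if stransAltSymChar c = '*' then ['S','t','o','p'] else [stransAltSymChar c]

-- abstract streaming over the symbol list
def stransStream : List (List Char) → List Char → List (List Char) → List (List Char)
  | [], curr, peps => if curr ≠ [] then peps ++ [curr] else peps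
  | s :: rest, curr, peps =>
    if s = ['S','t','o','p'] then
      stransStream rest [] (if curr ≠ [] then peps ++ [curr] else peps)
    else stransStream rest (curr ++ s) peps

-- the pieces 'Stop'-splitting produces, built front-to-back from the symbol list
def stransPieces : List (List Char) → List (List Char)
  | [] => [[]]
  | s :: rest =>
    if s = ['S','t','o','p'] then [] :: stransPieces rest
    else match stransPieces rest with
      | [] => [s]
      | h :: t => (s ++ h) :: t

def stransPrepend (w : List Char) : List (List Char) → List (List Char)
  | [] => [w]
  | h :: t => (w ++ h) :: t

def stransFilt : List (List Char) → List (List Char)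
  | [] => []
  | p :: r => if p.length ≠ 0 then p :: stransFilt r else stransFilt r

-- a table symbol: exactly 'Stop', or at most one character none of which is 't'
def stransGood (s : List Char) : Bool := s == ['S','t','o','p'] || (s.length ≤ 1 && s.all (· ≠ 't'))

theorem stransPieces_ne_nil (syms : List (List Char)) : stransPieces syms ≠ [] := by
  cases syms with
  | nil => simp [stransPieces]
  | cons s rest =>
    simp only [stransPieces]
    split
    · simp
    · split <;> simp

theorem good_sym (c : List Char) : stransGood (stransSym c) = true := by
  unfold stransSym PySem.Dict.get?
  cases h : List.find? (fun p => p.1 == c) stransTable.items with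
  | none => simp [stransGood]
  | some p =>
    have hmem := List.mem_of_find?_eq_some h
    have : ∀ q ∈ stransTable.items, stransGood q.2 = true := by
      set_option maxRecDepth 100000 in decide
    simp
    exact this p hmem

theorem flatten_head_not_t (syms : List (List Char)) (hg : ∀ s ∈ syms, stransGood s = true) :
    ∀ c, syms.flatten.head? = some c → c ≠ 't' := by
  induction syms with
  | nil => simp
  | cons s rest ih =>
    have hs := hg s (by simp)
    have hrest : ∀ x ∈ rest, stransGood x = true := fun x hx => hg x (List.mem_cons_of_mem _ hx)
    intro c hc
    cases s with
    | nil => exact ih hrest c (by simpa using hc)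
    | cons a as =>
      simp at hc
      subst hc
      simp [stransGood] at hs
      rcases hs with h1 | h2
      · rw [h1.1]; decide
      · exact h2.2.1

theorem foldl_filt (l : List (List Char)) : ∀ init,
    l.foldl (fun peps p => if p.length ≠ 0 then peps ++ [p] else peps) init = init ++ stransFilt l := by
  induction l with
  | nil => simp [stransFilt]
  | cons p r ih =>
    intro init
    simp only [List.foldl_cons, stransFilt]
    by_cases hp : p.length ≠ 0
    · rw [if_pos hp, if_pos hp, ih]
      simp
    · rw [if_neg hp, if_neg hp, ih]

theorem stransLoop_eq (cs : List Char) : ∀ start, stransLoop cs start = stransChunks (cs.drop start) := by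
  intro start
  induction hn : cs.length - start using Nat.strong_induction_on generalizing start with
  | _ n ih =>
  by_cases h : start < cs.length
  · rw [stransLoop]
    simp only [h, dite_true]
    have hslice : PySem.List.slice cs (some (start : Int)) (some ((start : Int) + 3)) = (cs.drop start).take 3 := by
      rw [PySem.List.slice_toNat cs (a := (start : Int)) (b := (start : Int) + 3) (by omega) (by omega)]
      congr 1
      omega
    have hd : cs.drop start ≠ [] := by
      intro he
      have := List.drop_eq_nil_iff.mp he
      omega
    obtain ⟨c, r, hcr⟩ := List.exists_cons_of_ne_nil hd
    have hrec := ih (cs.length - (start + 3)) (by omega) (start + 3) rfl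
    rw [hslice, hrec, hcr, stransChunks]
    have : cs.drop (start + 3) = (c :: r).drop 3 := by
      rw [← hcr, List.drop_drop]
    rw [this]
  · rw [stransLoop]
    simp only [h, dite_false]
    rw [List.drop_eq_nil_of_le (by omega)]
    rw [stransChunks]

-- B's index loop is the stream over the altSym symbols of the chunks
theorem altGo_eq (cs : List Char) : ∀ i cur peps,
    stransAltGo cs i cur peps = stransStream ((stransChunks (cs.drop i)).map stransAltSym) cur peps := by
  intro i
  induction hn : cs.length - i using Nat.strong_induction_on generalizing i with
  | _ n ih =>
  intro cur peps
  by_cases h : i < cs.length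
  · rw [stransAltGo]
    simp only [h, dite_true]
    have hslice : PySem.List.slice cs (some (i : Int)) (some ((i : Int) + 3)) = (cs.drop i).take 3 := by
      rw [PySem.List.slice_toNat cs (a := (i : Int)) (b := (i : Int) + 3) (by omega) (by omega)]
      congr 1
      omega
    have hd : cs.drop i ≠ [] := by
      intro he
      have := List.drop_eq_nil_iff.mp he
      omega
    obtain ⟨c, r, hcr⟩ := List.exists_cons_of_ne_nil hd
    have hdrop3 : cs.drop (i + 3) = (c :: r).drop 3 := by
      rw [← hcr, List.drop_drop]
    have hrec := ih (cs.length - (i + 3)) (by omega) (i + 3) rfl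
    rw [hslice, hcr, stransChunks]
    simp only [List.map_cons, stransStream]
    by_cases hnl : (c :: r).take 3 = ['\n']
    · rw [if_pos hnl]
      have hsym : stransAltSym ((c :: r).take 3) = [] := by rw [stransAltSym, if_pos hnl]
      rw [hsym]
      rw [if_neg (by decide : ¬([] : List Char) = ['S','t','o','p'])]
      rw [hrec cur peps, hdrop3]
      simp
    · rw [if_neg hnl]
      by_cases hstar : stransAltSymChar ((c :: r).take 3) = '*'
      · have hsym : stransAltSym ((c :: r).take 3) = ['S','t','o','p'] := by
          rw [stransAltSym, if_neg hnl, if_pos hstar]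
        rw [hsym, if_pos hstar, if_pos rfl, hrec, hdrop3]
      · have hsym : stransAltSym ((c :: r).take 3) = [stransAltSymChar ((c :: r).take 3)] := by
          rw [stransAltSym, if_neg hnl, if_neg hstar]
        rw [hsym]
        rw [if_neg hstar, if_neg (by intro he; exact absurd (congrArg List.length he) (by simp))]
        rw [hrec, hdrop3]
  · rw [stransAltGo]
    simp only [h, dite_false]
    rw [List.drop_eq_nil_of_le (by omega), stransChunks]
    simp [stransStream]

-- on every key of A's table, B's arithmetic lookup yields the same symbol
theorem altSym_eq_sym (c : List Char) (h : stransTable.contains c = true) :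
    stransAltSym c = stransSym c := by
  have hm : c ∈ stransTable.keys := by
    rw [PySem.Dict.contains_eq_decide_mem_keys] at h
    exact of_decide_eq_true h
  have hall : ∀ k ∈ stransTable.keys, stransAltSym k = stransSym k := by
    set_option maxRecDepth 100000 in decide
  exact hall c hm

-- every chunk is a (drop i).take 3 slice at a multiple of 3 inside the string
theorem mem_chunks (ch : List Char) : ∀ cs : List Char, ch ∈ stransChunks cs →
    ∃ i, i < cs.length ∧ i % 3 = 0 ∧ ch = (cs.drop i).take 3 := by
  intro cs
  induction hn : cs.length using Nat.strong_induction_on generalizing cs with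
  | _ n ih =>
  intro hmem
  cases cs with
  | nil => simp [stransChunks] at hmem
  | cons c r =>
    rw [stransChunks] at hmem
    subst hn
    rcases List.mem_cons.mp hmem with rfl | htail
    · exact ⟨0, by simp, rfl, by simp⟩
    · obtain ⟨i, hi, h3, hch⟩ := ih ((c :: r).drop 3).length
        (by simp only [List.length_drop, List.length_cons]; omega) _ rfl htail
      refine ⟨i + 3, ?_, by omega, ?_⟩
      · rw [List.length_drop] at hi; simp only [List.length_cons] at hi ⊢; omega
      · rw [hch, List.drop_drop]
        congr 2
        omega

theorem stream_eq (syms : List (List Char)) : ∀ curr peps,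
    stransStream syms curr peps = peps ++ stransFilt (stransPrepend curr (stransPieces syms)) := by
  induction syms with
  | nil =>
    intro curr peps
    simp only [stransStream, stransPieces, stransPrepend, stransFilt]
    by_cases h : curr = []
    · subst h; simp
    · simp [List.length_eq_zero_iff, h]
  | cons s rest ih =>
    intro curr peps
    simp only [stransStream, stransPieces]
    obtain ⟨h, t, hht⟩ := List.exists_cons_of_ne_nil (stransPieces_ne_nil rest)
    by_cases hs : s = ['S','t','o','p']
    · simp only [hs, if_true, ih]
      rw [hht]
      simp only [stransPrepend, stransFilt]
      by_cases h0 : curr = []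
      · subst h0; simp
      · simp [List.length_eq_zero_iff, h0]
    · simp only [hs, if_false, ih]
      rw [hht]
      simp only [stransPrepend, stransFilt]
      simp [List.append_assoc]

theorem go_flatten (syms : List (List Char)) (hg : ∀ s ∈ syms, stransGood s = true) :
    ∀ (fuel : Nat) (curr : List Char) (acc : List (List Char)), syms.flatten.length + 1 ≤ fuel →
    PySem.Chars.splitOn.go ['S','t','o','p'] fuel syms.flatten curr acc
      = acc.reverse ++ stransPrepend curr.reverse (stransPieces syms) := by
  induction syms with
  | nil =>
    intro fuel curr acc _
    cases fuel <;> simp [PySem.Chars.splitOn.go, stransPieces, stransPrepend]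
  | cons s rest ih =>
    intro fuel curr acc hf
    have hrest : ∀ x ∈ rest, stransGood x = true := fun x hx => hg x (List.mem_cons_of_mem _ hx)
    have hs := hg s (by simp)
    simp only [stransGood, Bool.or_eq_true, beq_iff_eq, Bool.and_eq_true, decide_eq_true_eq,
      List.all_eq_true] at hs
    rcases hs with hstop | ⟨hlen, hnt⟩
    · -- s = "Stop"
      subst hstop
      have hflat : (['S','t','o','p'] :: rest).flatten = 'S' :: 't' :: 'o' :: 'p' :: rest.flatten := by simp
      rw [hflat] at hf ⊢
      obtain ⟨f, rfl⟩ : ∃ f, fuel = f + 1 := ⟨fuel - 1, by omega⟩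
      rw [PySem.Chars.splitOn.go]
      simp only [List.isPrefixOf_iff_prefix]
      rw [if_pos (by exact ⟨rest.flatten, rfl⟩)]
      have hdrop : List.drop (['S','t','o','p'] : List Char).length ('S' :: 't' :: 'o' :: 'p' :: rest.flatten) = rest.flatten := rfl
      rw [hdrop]
      rw [ih hrest f [] (curr.reverse :: acc) (by simp at hf ⊢; omega)]
      obtain ⟨h, t, hht⟩ := List.exists_cons_of_ne_nil (stransPieces_ne_nil rest)
      have hsp : stransPieces (['S','t','o','p'] :: rest) = [] :: stransPieces rest := by
        simp [stransPieces]
      rw [hsp, hht]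
      simp [stransPrepend]
    · -- s is [] or a single non-'t' char
      cases s with
      | nil =>
        have hflat : (([] : List Char) :: rest).flatten = rest.flatten := by simp
        rw [hflat] at hf ⊢
        rw [ih hrest fuel curr acc hf]
        obtain ⟨h, t, hht⟩ := List.exists_cons_of_ne_nil (stransPieces_ne_nil rest)
        have : stransPieces (([] : List Char) :: rest) = stransPieces rest := by
          simp only [stransPieces, if_neg (by decide : ¬([] : List Char) = ['S','t','o','p'])]
          rw [hht]
          simp
        rw [this]
      | cons a as =>
        have has : as = [] := by
          cases as
          · rfl
          · simp at hlen
        subst has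
        have ha : a ≠ 't' := hnt a (by simp)
        have hflat : ([a] :: rest).flatten = a :: rest.flatten := by simp
        rw [hflat] at hf ⊢
        obtain ⟨f, rfl⟩ : ∃ f, fuel = f + 1 := ⟨fuel - 1, by omega⟩
        rw [PySem.Chars.splitOn.go]
        simp only [List.isPrefixOf_iff_prefix]
        rw [if_neg ?hpre]
        case hpre =>
          intro hp
          rcases List.cons_prefix_cons.mp hp with ⟨rfl, hp2⟩
          cases hfl : rest.flatten with
          | nil => rw [hfl] at hp2; exact absurd hp2.length_le (by simp)
          | cons x xs =>
            rw [hfl] at hp2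
            rcases List.cons_prefix_cons.mp hp2 with ⟨hx, _⟩
            have hc := flatten_head_not_t rest hrest x (by rw [hfl]; rfl)
            exact hc hx.symm
        rw [ih hrest f (a :: curr) acc (by simp at hf ⊢; omega)]
        obtain ⟨h, t, hht⟩ := List.exists_cons_of_ne_nil (stransPieces_ne_nil rest)
        have hne : ¬([a] : List Char) = ['S','t','o','p'] := by simp
        simp only [stransPieces, if_neg hne]
        rw [hht]
        simp [stransPrepend]

theorem intercalate_nil_flatten (parts : List (List Char)) : ([] : List Char).intercalate parts = parts.flatten := by
  induction parts with
  | nil => rfl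
  | cons h t ih => cases t with
    | nil => rfl
    | cons h2 t2 => simpa [List.intercalate, List.intersperse] using (by simpa [List.intercalate] using ih)

theorem strans_eq_stream (mrna_strand : String) :
    strans mrna_strand = (stransStream ((stransChunks mrna_strand.toList).map stransSym) [] []).map String.ofList := by
  simp only [strans]
  have hsyms : ∀ s ∈ (stransChunks mrna_strand.toList).map stransSym, stransGood s = true := by
    intro s hs
    rw [List.mem_map] at hs
    obtain ⟨c, _, rfl⟩ := hs
    exact good_sym c
  rw [stransLoop_eq mrna_strand.toList 0, List.drop_zero]
  have hjoin : PySem.Chars.join [] ((stransChunks mrna_strand.toList).map stransSym)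
      = ((stransChunks mrna_strand.toList).map stransSym).flatten := by
    simp [PySem.Chars.join, intercalate_nil_flatten]
  rw [hjoin]
  have hsplit : PySem.Chars.splitOn (((stransChunks mrna_strand.toList).map stransSym).flatten) ['S','t','o','p']
      = stransPieces ((stransChunks mrna_strand.toList).map stransSym) := by
    unfold PySem.Chars.splitOn
    rw [go_flatten _ hsyms _ [] [] (by omega)]
    obtain ⟨h, t, hht⟩ := List.exists_cons_of_ne_nil (stransPieces_ne_nil ((stransChunks mrna_strand.toList).map stransSym))
    rw [hht]
    simp [stransPrepend]
  rw [hsplit, foldl_filt]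
  rw [stream_eq]
  obtain ⟨h, t, hht⟩ := List.exists_cons_of_ne_nil (stransPieces_ne_nil ((stransChunks mrna_strand.toList).map stransSym))
  rw [hht]
  simp [stransPrepend]

-- ===== VERDICT (by name: the statement is the Claim_ definition above) =====
theorem strans_spec : Claim_equal_strans := by
  intro mrna_strand _hdom hpre
  unfold Spec_strans
  rw [strans_eq_stream]
  simp only [strans_alt]
  rw [altGo_eq mrna_strand.toList 0 [] [], List.drop_zero]
  have hmap : (stransChunks mrna_strand.toList).map stransAltSym = (stransChunks mrna_strand.toList).map stransSym := by
    apply List.map_congr_left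
    intro ch hch
    obtain ⟨i, hi, h3, rfl⟩ := mem_chunks ch mrna_strand.toList hch
    exact altSym_eq_sym _ (hpre i (List.mem_range.mpr hi) h3)
  rw [hmap]
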